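-- pv_equiv track=rewrite | github.com/tcozzib/TPgrupal-NicolasAristidesTomas | biblioteca.py | columnasConsecutivasDescendentes
-- ===== SOURCE A (Python) =====
-- Posición = tuple[str,int]            # una ubicación de una grilla, dada por una letra y un número
--
-- def númeroDePosición(posición: Posición) -> int:
--     """ Describe el número de la posición *posición*. """
--     return posición[1]
--
-- def columnasConsecutivasDescendentes(posiciones: list[Posición]) -> bool:
--     """ Indica si las columnas de las posiciones en *posiciones* son consecutivas de forma descendente.
--         PRE: sonPosicionesVálidas(posiciones)
--     """
--     if len(posiciones) == 0:
--         return True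
--     columnaActual = númeroDePosición(posiciones[0])
--     posiciónActual = 1
--     while posiciónActual < len(posiciones) and númeroDePosición(posiciones[posiciónActual]) == columnaActual - 1:
--         posiciónActual += 1
--         columnaActual -= 1
--     return posiciónActual == len(posiciones)
-- ===== SOURCE B (Python) =====
-- def columnasConsecutivasDescendentes(posiciones: list) -> bool:
--     nums = [p[1] for p in posiciones]
--     if not nums:
--         return True
--     return nums == list(range(nums[0], nums[0] - len(nums), -1))
-- ===== Notes on version B (the rewrite author's own statement) =====
-- stated objective: simpler
-- what changed: Replaces the index-based while loop with early exit by a closed-form comparison of the column list against the expected descending arithmetic sequence built with range().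
import Mathlib
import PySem

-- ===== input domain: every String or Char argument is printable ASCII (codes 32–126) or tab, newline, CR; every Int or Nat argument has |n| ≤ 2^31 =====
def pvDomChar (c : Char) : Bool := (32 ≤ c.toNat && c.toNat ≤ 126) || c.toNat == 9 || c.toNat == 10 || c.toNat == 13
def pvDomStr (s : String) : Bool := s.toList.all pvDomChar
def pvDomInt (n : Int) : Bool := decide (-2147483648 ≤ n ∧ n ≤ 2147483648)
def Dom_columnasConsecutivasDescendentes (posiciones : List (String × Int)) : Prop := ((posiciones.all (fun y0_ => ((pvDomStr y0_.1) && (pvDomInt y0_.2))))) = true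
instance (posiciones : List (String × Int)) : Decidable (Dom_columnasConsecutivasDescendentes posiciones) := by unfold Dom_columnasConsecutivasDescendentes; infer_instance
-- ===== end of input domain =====

-- B replaces A's index-based early-exit while loop by a closed-form comparison of the
-- column list against the expected descending arithmetic sequence (simpler; same cost).

-- ===== PORT A =====
def pvNumeroDePosicion (p : String × Int) : Int := p.2

-- A's while loop: state (posiciónActual = i, columnaActual = col); returns the final i.
def pvALoop (posiciones : List (String × Int)) (col : Int) (i : Nat) : Nat :=
  if h : i < posiciones.length then
    if pvNumeroDePosicion posiciones[i] = col - 1 then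
      pvALoop posiciones (col - 1) (i + 1)
    else i
  else i
termination_by posiciones.length - i

def columnasConsecutivasDescendentes (posiciones : List (String × Int)) : Bool :=
  match posiciones with
  | [] => true
  | p :: _ =>
    let columnaActual := pvNumeroDePosicion p
    decide (pvALoop posiciones columnaActual 1 = posiciones.length)

-- ===== PORT B =====
def columnasConsecutivasDescendentes_alt (posiciones : List (String × Int)) : Bool :=
  let nums := posiciones.map (fun p => p.2)
  match nums with
  | [] => true
  | n0 :: _ => decide (nums = PySem.List.pyRange n0 (n0 - (nums.length : Int)) (-1))

-- ===== PRECONDITION & SPEC =====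
def Spec_columnasConsecutivasDescendentes (posiciones : List (String × Int)) (out : Bool) : Prop := out = columnasConsecutivasDescendentes_alt posiciones
instance (posiciones : List (String × Int)) (out : Bool) : Decidable (Spec_columnasConsecutivasDescendentes posiciones out) := by unfold Spec_columnasConsecutivasDescendentes; infer_instance

-- ===== CLAIM (what is proved, stated in full; the proofs are below) =====
def Claim_equal_columnasConsecutivasDescendentes : Prop := ∀ (posiciones : List (String × Int)), Dom_columnasConsecutivasDescendentes posiciones → Spec_columnasConsecutivasDescendentes posiciones (columnasConsecutivasDescendentes posiciones)

-- ===== LEMMAS AND PROOFS =====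

-- Chain predicate: the second components of the list are col-1, col-2, …
def pvChain (col : Int) : List (String × Int) → Bool
  | [] => true
  | x :: xs => (decide (x.2 = col - 1)) && pvChain (col - 1) xs

theorem pvALoop_eq_chain (posiciones : List (String × Int)) (col : Int) (i : Nat)
    (hle : i ≤ posiciones.length) :
    (pvALoop posiciones col i = posiciones.length) ↔
      pvChain col (posiciones.drop i) = true := by
  by_cases h : i < posiciones.length
  · have hdrop : posiciones.drop i = posiciones[i] :: posiciones.drop (i + 1) :=
      List.drop_eq_getElem_cons h
    rw [pvALoop, dif_pos h, hdrop]
    simp only [pvChain, Bool.and_eq_true, decide_eq_true_eq]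
    by_cases hc : pvNumeroDePosicion posiciones[i] = col - 1
    · rw [if_pos hc]
      rw [pvALoop_eq_chain posiciones (col - 1) (i + 1) h]
      exact ⟨fun h2 => ⟨hc, h2⟩, fun h2 => h2.2⟩
    · rw [if_neg hc]
      constructor
      · intro hi; exact absurd hi (by omega)
      · rintro ⟨h1, -⟩; exact absurd h1 hc
  · have hi : i = posiciones.length := le_antisymm hle (not_lt.mp h)
    rw [pvALoop, dif_neg h, hi]
    simp [List.drop_length, pvChain]
termination_by posiciones.length - i

theorem pvChain_eq_range (l : List (String × Int)) (c : Int) :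
    (pvChain c l = true) ↔
      l.map (fun p => p.2) = PySem.List.pyRange (c - 1) (c - 1 - (l.length : Int)) (-1) := by
  induction l generalizing c with
  | nil =>
    simp [pvChain]
  | cons x xs ih =>
    have harith : c - 1 - 1 - (xs.length : Int) = c - 1 - (((x :: xs).length : Int)) := by
      push_cast [List.length_cons]; ring
    have hlt : c - 1 - (((x :: xs).length : Int)) < c - 1 := by
      push_cast [List.length_cons]; omega
    rw [PySem.List.pyRange_neg_one_cons hlt]
    simp only [pvChain, List.map_cons, Bool.and_eq_true, decide_eq_true_eq, List.cons.injEq]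
    rw [← harith, ih (c - 1)]

-- ===== VERDICT (by name: the statement is the Claim_ definition above) =====
theorem columnasConsecutivasDescendentes_spec : Claim_equal_columnasConsecutivasDescendentes := by
  intro posiciones _
  unfold Spec_columnasConsecutivasDescendentes
  cases posiciones with
  | nil => rfl
  | cons p rest =>
    show decide (pvALoop (p :: rest) (pvNumeroDePosicion p) 1 = (p :: rest).length) =
      decide ((p :: rest).map (fun q => q.2) =
        PySem.List.pyRange p.2 (p.2 - ((((p :: rest).map (fun q => q.2)).length : Int))) (-1))
    rw [decide_eq_decide]
    have hlt : p.2 - ((((p :: rest).map (fun q => q.2)).length : Int)) < p.2 := by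
      push_cast [List.length_map, List.length_cons]; omega
    rw [PySem.List.pyRange_neg_one_cons hlt]
    have harith : p.2 - 1 - ((rest.length : Int)) =
        p.2 - ((((p :: rest).map (fun q => q.2)).length : Int)) := by
      push_cast [List.length_map, List.length_cons]; ring
    have hA := pvALoop_eq_chain (p :: rest) (pvNumeroDePosicion p) 1 (by simp)
    have hdrop : (p :: rest).drop 1 = rest := rfl
    rw [hdrop] at hA
    rw [hA]
    simp only [pvNumeroDePosicion] at *
    rw [pvChain_eq_range rest p.2, harith]
    simp only [List.map_cons, List.cons.injEq, true_and]
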